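-- pv_equiv track=rewrite | github.com/pp8817/Algorithm | 프로그래머스/1/161989. 덧칠하기/덧칠하기.py | solution
-- ===== SOURCE A (Python) =====
-- def solution(n, m, section):
--     dic = {i:1 for i in range(1, n+1)}
--     for i in section:
--         dic[i] = 0
--     answer = 0
--     i = 1
--     while n>=i:
--         if dic[i] == 0:
--             answer += 1
--             i += m
--         else:
--             i+=1
--     return answer
-- ===== SOURCE B (Python) =====
-- def solution(n, m, section):
--     count = 0
--     reach = 0
--     for x in sorted(section):
--         if 1 <= x <= n and x > reach:
--             count += 1
--             reach = x + m - 1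
--     return count
-- ===== Notes on version B (the rewrite author's own statement) =====
-- stated objective: alternative
-- what changed: Instead of building a 0/1 dict over all wall positions 1..n and walking the wall position by position, B sorts the damaged sections and greedily counts a stroke at each damaged section lying past the previous stroke's reach; Pre_ excludes m <= 0 with a damaged section inside [1,n], where A loops forever or raises KeyError.
import Mathlib
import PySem

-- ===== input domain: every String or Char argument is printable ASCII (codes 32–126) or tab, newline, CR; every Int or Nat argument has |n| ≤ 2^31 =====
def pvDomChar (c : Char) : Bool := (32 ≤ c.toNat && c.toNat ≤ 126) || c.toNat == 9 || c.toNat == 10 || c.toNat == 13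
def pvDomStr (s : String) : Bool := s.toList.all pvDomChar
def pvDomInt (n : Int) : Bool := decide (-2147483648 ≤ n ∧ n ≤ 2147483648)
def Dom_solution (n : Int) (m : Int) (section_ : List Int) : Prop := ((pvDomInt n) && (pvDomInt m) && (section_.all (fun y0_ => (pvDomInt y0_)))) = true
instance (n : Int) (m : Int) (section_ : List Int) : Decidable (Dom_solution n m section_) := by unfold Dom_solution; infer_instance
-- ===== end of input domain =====

-- B replaces A's position-by-position walk over a 0/1 dict of all wall positions 1..n by a
-- greedy scan of the sorted damaged sections (one stroke per damaged section past the previous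
-- stroke's reach): a different algorithm over the damaged sections instead of the wall positions.

-- ===== PORT A =====
-- dic = {i:1 for i in range(1, n+1)}; for i in section: dic[i] = 0
-- The Python dict is ported by hand as Std.HashMap: A only point-reads and point-overwrites it
-- (insertion order is never observed), and Python's dict lookups are O(1), which the
-- association-list model cannot evaluate for wall lengths like n = 10^6; insert/lookup/KeyError
-- semantics are exact (missing key → none = KeyError).
def dictA (n : Int) (section_ : List Int) : Std.HashMap Int Int :=
  section_.foldl (fun d i => d.insert i 0)
    ((PySem.List.pyRange 1 (n+1) 1).foldl (fun d i => d.insert i 1) ∅)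

-- the 'while n >= i' loop; fuel bounds the iterations (the loop advances i by at least 1 on
-- every input inside Pre_, so n.toNat + 1 fuel is never exhausted there); the 'none' branch is
-- Python's KeyError, unreachable inside Pre_.
def loopA (n m : Int) (dic : Std.HashMap Int Int) : Nat → Int → Int → Int
  | 0, _, answer => answer
  | f+1, i, answer =>
    if n ≥ i then
      match dic[i]? with
      | some v => if v == 0 then loopA n m dic f (i+m) (answer+1) else loopA n m dic f (i+1) answer
      | none => answer
    else answer

def solution (n : Int) (m : Int) (section_ : List Int) : Int :=
  loopA n m (dictA n section_) (n.toNat + 1) 1 0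

-- ===== PORT B =====
def stepB (n m : Int) (s : Int × Int) (x : Int) : Int × Int :=
  if 1 ≤ x ∧ x ≤ n ∧ s.2 < x then (s.1 + 1, x + m - 1) else s

def solution_alt (n : Int) (m : Int) (section_ : List Int) : Int :=
  ((PySem.List.sorted section_ (fun x => x) false).foldl (stepB n m) (0, 0)).1

-- ===== PRECONDITION & SPEC =====
-- Pre_ excludes exactly the inputs where A never returns: when m ≤ 0 and some damaged section
-- lies inside [1, n], A's while loop never passes n (it loops forever, e.g. m = 0, or walks i
-- below every dict key and raises KeyError).
def Pre_solution (n : Int) (m : Int) (section_ : List Int) : Prop :=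
  1 ≤ m ∨ ∀ x ∈ section_, x < 1 ∨ n < x
instance (n : Int) (m : Int) (section_ : List Int) : Decidable (Pre_solution n m section_) := by
  unfold Pre_solution; infer_instance

def pvWitness_solution : Int × Int × List Int := (8, 4, [2, 4, 6])

def Spec_solution (n : Int) (m : Int) (section_ : List Int) (out : Int) : Prop :=
  out = solution_alt n m section_
instance (n : Int) (m : Int) (section_ : List Int) (out : Int) : Decidable (Spec_solution n m section_ out) := by
  unfold Spec_solution; infer_instance

-- ===== CLAIM (what is proved, stated in full; the proofs are below) =====
def Claim_equal_solution : Prop := ∀ (n : Int) (m : Int) (section_ : List Int), Dom_solution n m section_ → Pre_solution n m section_ → Spec_solution n m section_ (solution n m section_)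

-- ===== LEMMAS AND PROOFS =====

-- proof-only reference count: scan positions i..n, one stroke per first damaged position,
-- jumping m (inside Pre_, max m 1 = m) after a stroke.
def cnt (n m : Int) (S : List Int) (i : Int) : Int :=
  if i ≤ n then (if i ∈ S then 1 + cnt n m S (i + max m 1) else cnt n m S (i + 1)) else 0
termination_by (n + 1 - i).toNat
decreasing_by all_goals omega

theorem get?_foldl_insert_const (l : List Int) (v : Int) (d : Std.HashMap Int Int) (k : Int) :
    (l.foldl (fun d i => d.insert i v) d)[k]? = if k ∈ l then some v else d[k]? := by
  induction l generalizing d with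
  | nil => simp
  | cons x t ih =>
    simp only [List.foldl_cons, ih, List.mem_cons]
    by_cases hk : k ∈ t
    · simp [hk]
    · by_cases hx : k = x
      · simp [hx]
      · simp [hk, hx, Std.HashMap.getElem?_insert]
        exact fun h => absurd h.symm hx

theorem get?_dictA (n : Int) (s : List Int) (k : Int) :
    (dictA n s)[k]? =
      if k ∈ s then some 0 else if 1 ≤ k ∧ k < n + 1 then some 1 else none := by
  unfold dictA
  rw [get?_foldl_insert_const, get?_foldl_insert_const]
  simp [PySem.List.mem_pyRange_one]

theorem loopA_eq_cnt (n m : Int) (s : List Int) (hm : 1 ≤ m) :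
    ∀ (f : Nat) (i c : Int), 1 ≤ i → (n + 1 - i).toNat ≤ f →
      loopA n m (dictA n s) f i c = c + cnt n m s i := by
  intro f
  induction f with
  | zero =>
    intro i c hi hf
    rw [cnt, if_neg (by omega)]
    simp [loopA]
  | succ f ih =>
    intro i c hi hf
    by_cases hin : n ≥ i
    · rw [loopA, if_pos hin, get?_dictA]
      by_cases hmem : i ∈ s
      · rw [if_pos hmem]
        simp only [show ((0 : Int) == 0) = true from rfl, if_pos]
        have hcnt : cnt n m s i = 1 + cnt n m s (i + m) := by
          rw [cnt, if_pos (by omega), if_pos hmem, show max m 1 = m by omega]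
        have h1 : (1 : Int) ≤ i + m := by omega
        have h2 : (n + 1 - (i + m)).toNat ≤ f := by omega
        rw [ih (i + m) (c + 1) h1 h2, hcnt]
        ring
      · rw [if_neg hmem, if_pos (show 1 ≤ i ∧ i < n + 1 by omega)]
        simp only [show ((1 : Int) == 0) = false from rfl, Bool.false_eq_true, if_false]
        have hcnt : cnt n m s i = cnt n m s (i + 1) := by
          rw [cnt, if_pos (by omega), if_neg hmem]
        have h1 : (1 : Int) ≤ i + 1 := by omega
        have h2 : (n + 1 - (i + 1)).toNat ≤ f := by omega
        rw [ih (i + 1) c h1 h2, hcnt]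
    · rw [loopA, if_neg hin, cnt, if_neg (by omega)]
      ring

theorem cnt_zero (n m : Int) (s : List Int) :
    ∀ (k : Nat) (i : Int), (n + 1 - i).toNat ≤ k → (∀ z ∈ s, z < i ∨ n < z) →
      cnt n m s i = 0 := by
  intro k
  induction k with
  | zero =>
    intro i hk _
    rw [cnt, if_neg (by omega)]
  | succ k ih =>
    intro i hk h
    rw [cnt]
    by_cases hin : i ≤ n
    · have hmem : i ∉ s := fun hm' => by rcases h i hm' with h1 | h2 <;> omega
      rw [if_pos hin, if_neg hmem]
      exact ih (i+1) (by omega) (fun z hz => by rcases h z hz with h1 | h2 <;> omega)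
    · rw [if_neg hin]

theorem cnt_skip (n m : Int) (s : List Int) :
    ∀ (k : Nat) (i j : Int), (j - i).toNat ≤ k → i ≤ j →
      (∀ z ∈ s, ¬ (i ≤ z ∧ z < j)) → cnt n m s i = cnt n m s j := by
  intro k
  induction k with
  | zero =>
    intro i j hk hij _
    have : i = j := by omega
    rw [this]
  | succ k ih =>
    intro i j hk hij h
    by_cases hij' : i = j
    · rw [hij']
    · by_cases hin : i ≤ n
      · have hmem : i ∉ s := fun hm' => (h i hm') ⟨le_refl i, by omega⟩
        rw [cnt, if_pos hin, if_neg hmem]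
        exact ih (i+1) j (by omega) (by omega) (fun z hz hz' => (h z hz) ⟨by omega, hz'.2⟩)
      · rw [cnt, if_neg hin, cnt, if_neg (by omega)]

theorem foldB_eq_cnt (n m : Int) (s : List Int) (hm : 1 ≤ m) :
    ∀ (L : List Int) (c r : Int), 0 ≤ r →
      List.Pairwise (fun a b => a ≤ b) L →
      (∀ z, (z ∈ L ∧ 1 ≤ z ∧ z ≤ n ∧ r < z) ↔ (z ∈ s ∧ 1 ≤ z ∧ z ≤ n ∧ r < z)) →
      (L.foldl (stepB n m) (c, r)).1 = c + cnt n m s (r + 1) := by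
  intro L
  induction L with
  | nil =>
    intro c r hr _ hmem
    have h0 : cnt n m s (r + 1) = 0 := by
      apply cnt_zero n m s (n + 1 - (r + 1)).toNat (r + 1) (le_refl _)
      intro z hz
      by_cases h1 : 1 ≤ z ∧ z ≤ n ∧ r < z
      · have := ((hmem z).2 ⟨hz, h1⟩).1
        simp at this
      · omega
    rw [List.foldl_nil, h0]
    ring
  | cons x t ih =>
    intro c r hr hsorted hmem
    have hmin : ∀ y ∈ t, x ≤ y := fun y hy => (List.pairwise_cons.1 hsorted).1 y hy
    by_cases hc : 1 ≤ x ∧ x ≤ n ∧ r < x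
    · rw [List.foldl_cons, stepB, if_pos hc]
      have hx_s : x ∈ s := ((hmem x).1 ⟨List.mem_cons_self, hc⟩).1
      have hmem' : ∀ z, (z ∈ t ∧ 1 ≤ z ∧ z ≤ n ∧ x + m - 1 < z) ↔
          (z ∈ s ∧ 1 ≤ z ∧ z ≤ n ∧ x + m - 1 < z) := by
        intro z
        constructor
        · rintro ⟨hzL, hz1, hzn, hzr⟩
          exact ⟨((hmem z).1 ⟨List.mem_cons_of_mem x hzL, hz1, hzn, by omega⟩).1, hz1, hzn, hzr⟩
        · rintro ⟨hzs, hz1, hzn, hzr⟩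
          have hzL : z ∈ x :: t := ((hmem z).2 ⟨hzs, hz1, hzn, by omega⟩).1
          rcases List.mem_cons.1 hzL with hzx | hzt
          · omega
          · exact ⟨hzt, hz1, hzn, hzr⟩
      have hskip : cnt n m s (r + 1) = cnt n m s x := by
        apply cnt_skip n m s (x - (r + 1)).toNat (r + 1) x (le_refl _) (by omega)
        rintro z hzs ⟨hz1, hz2⟩
        have hzL : z ∈ x :: t := ((hmem z).2 ⟨hzs, by omega, by omega, by omega⟩).1
        rcases List.mem_cons.1 hzL with hzx | hzt
        · omega
        · have := hmin z hzt; omega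
      have hx : cnt n m s x = 1 + cnt n m s (x + m) := by
        rw [cnt, if_pos hc.2.1, if_pos hx_s, show max m 1 = m by omega]
      rw [ih (c + 1) (x + m - 1) (by omega) (List.pairwise_cons.1 hsorted).2 hmem',
          show x + m - 1 + 1 = x + m by ring, hskip, hx]
      ring
    · rw [List.foldl_cons, stepB, if_neg hc]
      apply ih c r hr (List.pairwise_cons.1 hsorted).2
      intro z
      constructor
      · rintro ⟨hzL, hq⟩
        exact ⟨((hmem z).1 ⟨List.mem_cons_of_mem x hzL, hq⟩).1, hq⟩
      · rintro ⟨hzs, hq⟩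
        have hzL : z ∈ x :: t := ((hmem z).2 ⟨hzs, hq⟩).1
        rcases List.mem_cons.1 hzL with hzx | hzt
        · exact absurd (hzx ▸ hq) hc
        · exact ⟨hzt, hq⟩

theorem loopA_out (n m : Int) (s : List Int) (h : ∀ x ∈ s, x < 1 ∨ n < x) :
    ∀ (f : Nat) (i c : Int), 1 ≤ i → loopA n m (dictA n s) f i c = c := by
  intro f
  induction f with
  | zero => intro i c _; simp [loopA]
  | succ f ih =>
    intro i c hi
    by_cases hin : n ≥ i
    · have hmem : i ∉ s := fun hm' => by rcases h i hm' with h1 | h2 <;> omega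
      rw [loopA, if_pos hin, get?_dictA, if_neg hmem,
          if_pos (show 1 ≤ i ∧ i < n + 1 by omega)]
      simp only [show ((1 : Int) == 0) = false from rfl, Bool.false_eq_true, if_false]
      exact ih (i+1) c (by omega)
    · rw [loopA, if_neg hin]

theorem foldB_skip (n m : Int) (L : List Int) (c r : Int)
    (h : ∀ x ∈ L, ¬ (1 ≤ x ∧ x ≤ n ∧ r < x)) :
    L.foldl (stepB n m) (c, r) = (c, r) := by
  induction L with
  | nil => rfl
  | cons x t ih =>
    rw [List.foldl_cons, stepB, if_neg (h x List.mem_cons_self)]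
    exact ih (fun y hy => h y (List.mem_cons_of_mem x hy))

-- ===== VERDICT (by name: the statement is the Claim_ definition above) =====
theorem solution_spec : Claim_equal_solution := by
  intro n m section_ _ hpre
  unfold Spec_solution solution solution_alt
  rcases hpre with hm | hout
  · rw [loopA_eq_cnt n m section_ hm (n.toNat + 1) 1 0 (by omega) (by omega)]
    rw [foldB_eq_cnt n m section_ hm (PySem.List.sorted section_ (fun x => x) false) 0 0
      (le_refl 0) (PySem.List.sorted_pairwise section_ (fun x => x))
      (fun z => by simp [PySem.List.mem_sorted])]
    norm_num
  · rw [loopA_out n m section_ hout (n.toNat + 1) 1 0 (by omega)]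
    rw [foldB_skip n m (PySem.List.sorted section_ (fun x => x) false) 0 0
      (fun x hx hq => by
        rcases hout x ((PySem.List.mem_sorted _ _ _ _).1 hx) with h1 | h2 <;> omega)]
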